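-- pv_equiv track=rewrite | github.com/dwueppel/adbi | adbi/__init__.py | _format_operation_parts_named
-- ===== SOURCE A (Python) =====
-- def _format_operation_parts_named(parts):
--     '''
--     Format the parts of the operation to replace the original placeholders
--     with named placeholders of the format :name. Also, return a mapping of
--     original placeholder names to the new variable names.
--     '''
--     query = ''
--     mappings = {}
--     var_count = 0
--     while len(parts) >= 2:
--         (part, var) = parts[:2]
--         parts = parts[2:]
--         if var not in mappings:
--             var_count += 1
--             var_name = 'var{0}'.format(var_count)
--             mappings[var] = var_name
--         else:
--             var_name = mappings[var]
--
--         query += part + ':{0}'.format(var_name)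
--     if parts:
--         query += parts[0]
--
--     return query, mappings
-- ===== SOURCE B (Python) =====
-- def _format_operation_parts_named(parts):
--     '''
--     Same result as A: pair up parts once (zip of one iterator with itself),
--     build the name mapping in one pass, then join the pieces.
--     '''
--     it = iter(parts)
--     pairs = list(zip(it, it))
--     mappings = {}
--     for _, var in pairs:
--         if var not in mappings:
--             mappings[var] = 'var{0}'.format(len(mappings) + 1)
--     pieces = [part + ':' + mappings[var] for part, var in pairs]
--     if len(parts) % 2 == 1:
--         pieces.append(parts[-1])
--     return ''.join(pieces), mappings
-- ===== Notes on version B (the rewrite author's own statement) =====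
-- stated objective: faster
-- what changed: Instead of A's while loop that repeatedly slices the list and concatenates onto the query string, B pairs the parts up once (zip of one iterator with itself), builds the name mapping in a single pass over the pairs, and joins the formatted pieces with ''.join.
import Mathlib
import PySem

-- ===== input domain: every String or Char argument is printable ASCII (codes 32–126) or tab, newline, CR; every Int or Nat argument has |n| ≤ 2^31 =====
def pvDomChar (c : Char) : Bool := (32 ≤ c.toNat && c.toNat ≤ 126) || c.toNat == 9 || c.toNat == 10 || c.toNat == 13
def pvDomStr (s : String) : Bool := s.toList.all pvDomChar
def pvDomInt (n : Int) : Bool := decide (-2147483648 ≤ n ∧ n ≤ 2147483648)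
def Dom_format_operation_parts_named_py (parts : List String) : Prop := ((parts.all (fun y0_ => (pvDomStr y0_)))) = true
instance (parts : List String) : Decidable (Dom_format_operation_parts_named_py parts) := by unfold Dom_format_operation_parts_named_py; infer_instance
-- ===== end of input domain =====

-- B pairs the parts up once and joins collected pieces instead of A's repeated list slicing and quadratic string concatenation.

-- ===== PORT A =====
-- A's while loop: take two elements off the front, extend query, record fresh names.
def fmtNamedLoop : List String → String → PySem.Dict String String → Int → String × (List (String × String))
  | part :: var :: rest, query, mappings, var_count =>
    match mappings.get? var with
    | none =>
      let var_count := var_count + 1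
      let var_name := "var" ++ PySem.Int.toStr var_count
      fmtNamedLoop rest (query ++ part ++ ":" ++ var_name) (mappings.insert var var_name) var_count
    | some var_name =>
      fmtNamedLoop rest (query ++ part ++ ":" ++ var_name) mappings var_count
  | [x], query, mappings, _ => (query ++ x, mappings.items)
  | [], query, mappings, _ => (query, mappings.items)

def format_operation_parts_named_py (parts : List String) : String × (List (String × String)) :=
  fmtNamedLoop parts "" PySem.Dict.empty 0

-- ===== PORT B =====
-- list(zip(it, it)): consecutive pairs, leftover element dropped
def pairUp : List String → List (String × String)
  | p :: v :: rest => (p, v) :: pairUp rest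
  | _ => []

-- B's mapping-building for loop over the pairs
def varMap (pairs : List (String × String)) (m : PySem.Dict String String) : PySem.Dict String String :=
  pairs.foldl (fun m pv =>
    if m.contains pv.2 then m
    else m.insert pv.2 ("var" ++ PySem.Int.toStr ((m.size : Int) + 1))) m

def format_operation_parts_named_py_alt (parts : List String) : String × (List (String × String)) :=
  let pairs := pairUp parts
  let mappings := varMap pairs PySem.Dict.empty
  let pieces := pairs.map (fun pv => pv.1 ++ ":" ++ mappings.getD pv.2 "")
  let pieces := if parts.length % 2 == 1 then pieces ++ [PySem.List.pyGetD parts (-1) ""] else pieces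
  (PySem.Str.join "" pieces, mappings.items)

-- ===== PRECONDITION & SPEC =====
def Spec_format_operation_parts_named_py (parts : List String) (out : String × (List (String × String))) : Prop := out = format_operation_parts_named_py_alt parts
instance (parts : List String) (out : String × (List (String × String))) : Decidable (Spec_format_operation_parts_named_py parts out) := by unfold Spec_format_operation_parts_named_py; infer_instance

-- ===== CLAIM (what is proved, stated in full; the proofs are below) =====
def Claim_equal_format_operation_parts_named_py : Prop := ∀ (parts : List String), Dom_format_operation_parts_named_py parts → Spec_format_operation_parts_named_py parts (format_operation_parts_named_py parts)

-- ===== LEMMAS AND PROOFS =====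

-- varMap only inserts fresh keys, so existing bindings survive to the final map
theorem varMap_get?_mono (l : List (String × String)) (m : PySem.Dict String String)
    (k : String) (v : String) (h : m.get? k = some v) : (varMap l m).get? k = some v := by
  induction l generalizing m with
  | nil => simpa [varMap] using h
  | cons pv rest ih =>
    simp only [varMap, List.foldl_cons]
    split_ifs with hc
    · exact ih m h
    · apply ih
      have hk : k ≠ pv.2 := by
        intro he
        rw [PySem.Dict.contains_eq_isSome_get?] at hc
        rw [← he, h] at hc
        simp at hc
      rw [PySem.Dict.get?_insert_of_ne _ _ hk, h]

theorem join_empty_nil : PySem.Str.join "" ([] : List String) = "" := rfl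

theorem join_empty_cons (s : String) (l : List String) :
    PySem.Str.join "" (s :: l) = s ++ PySem.Str.join "" l := by
  cases l with
  | nil =>
    apply String.toList_inj.mp
    simp [PySem.Str.toList_join, PySem.Chars.join_singleton, PySem.Chars.join_nil]
  | cons t rest =>
    apply String.toList_inj.mp
    simp [String.toList_append, PySem.Str.toList_join, PySem.Chars.join_cons_cons]

theorem fmtNamedLoop_eq : ∀ (parts : List String) (q : String) (m : PySem.Dict String String),
    fmtNamedLoop parts q m (m.size : Int) =
      (q ++ PySem.Str.join ""
          (if parts.length % 2 == 1 then
            (pairUp parts).map (fun pv => pv.1 ++ ":" ++ (varMap (pairUp parts) m).getD pv.2 "")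
              ++ [PySem.List.pyGetD parts (-1) ""]
          else
            (pairUp parts).map (fun pv => pv.1 ++ ":" ++ (varMap (pairUp parts) m).getD pv.2 "")),
       (varMap (pairUp parts) m).items)
  | [], q, m => by
    simp [fmtNamedLoop, pairUp, varMap, join_empty_nil, String.append_empty]
  | [x], q, m => by
    have hget : PySem.List.pyGetD [x] (-1) "" = x := by
      rw [PySem.List.pyGetD_neg_one _ _ (by simp)]
      simp
    simp [fmtNamedLoop, pairUp, varMap, hget]
    apply String.toList_inj.mp
    simp [PySem.Str.toList_join, PySem.Chars.join_singleton]
  | p :: v :: rest, q, m => by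
    have hpair : pairUp (p :: v :: rest) = (p, v) :: pairUp rest := rfl
    cases hv : m.get? v with
    | some vn =>
      have hc : m.contains v = true := by
        rw [PySem.Dict.contains_eq_isSome_get?, hv]; rfl
      have hvm : varMap ((p, v) :: pairUp rest) m = varMap (pairUp rest) m := by
        simp [varMap, hc]
      have hfinal : (varMap (pairUp rest) m).getD v "" = vn :=
        PySem.Dict.getD_of_get?_eq_some _ _ (varMap_get?_mono _ m v vn hv)
      have ih := fmtNamedLoop_eq rest (q ++ p ++ ":" ++ vn) m
      simp only [fmtNamedLoop, hv]
      rw [ih]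
      by_cases hodd : (rest.length % 2 == 1) = true
      · have hne : rest ≠ [] := by
          intro h0; rw [h0] at hodd; simp at hodd
        have hlast : PySem.List.pyGetD (p :: v :: rest) (-1) "" = PySem.List.pyGetD rest (-1) "" := by
          rw [PySem.List.pyGetD_neg_one _ _ (by simp), PySem.List.pyGetD_neg_one _ _ hne]
          rw [List.getLast_cons (by simp), List.getLast_cons hne]
        have ho : rest.length % 2 = 1 := by simpa using hodd
        have hcond : (rest.length + 1 + 1) % 2 = 1 := by omega
        simp [hpair, hvm, hfinal, hcond, hodd, hlast, join_empty_cons, String.append_assoc]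
      · have ho : rest.length % 2 ≠ 1 := by simpa using hodd
        have hcond : ¬((rest.length + 1 + 1) % 2 = 1) := by omega
        simp [hpair, hvm, hfinal, hcond, hodd, join_empty_cons, String.append_assoc]
    | none =>
      have hc : m.contains v = false := by
        rw [PySem.Dict.contains_eq_isSome_get?, hv]; rfl
      have hsz : ((m.insert v ("var" ++ PySem.Int.toStr ((m.size : Int) + 1))).size : Int) = (m.size : Int) + 1 := by
        rw [PySem.Dict.size_insert, hc]
        simp
      have hvm : varMap ((p, v) :: pairUp rest) m
          = varMap (pairUp rest) (m.insert v ("var" ++ PySem.Int.toStr ((m.size : Int) + 1))) := by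
        simp [varMap, hc]
      have hfinal : (varMap (pairUp rest) (m.insert v ("var" ++ PySem.Int.toStr ((m.size : Int) + 1)))).getD v ""
          = "var" ++ PySem.Int.toStr ((m.size : Int) + 1) :=
        PySem.Dict.getD_of_get?_eq_some _ _
          (varMap_get?_mono _ _ v _ (PySem.Dict.get?_insert_self _ _ _))
      have ih := fmtNamedLoop_eq rest
        (q ++ p ++ ":" ++ ("var" ++ PySem.Int.toStr ((m.size : Int) + 1)))
        (m.insert v ("var" ++ PySem.Int.toStr ((m.size : Int) + 1)))
      rw [hsz] at ih
      simp only [fmtNamedLoop, hv]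
      rw [ih]
      by_cases hodd : (rest.length % 2 == 1) = true
      · have hne : rest ≠ [] := by
          intro h0; rw [h0] at hodd; simp at hodd
        have hlast : PySem.List.pyGetD (p :: v :: rest) (-1) "" = PySem.List.pyGetD rest (-1) "" := by
          rw [PySem.List.pyGetD_neg_one _ _ (by simp), PySem.List.pyGetD_neg_one _ _ hne]
          rw [List.getLast_cons (by simp), List.getLast_cons hne]
        have ho : rest.length % 2 = 1 := by simpa using hodd
        have hcond : (rest.length + 1 + 1) % 2 = 1 := by omega
        simp [hpair, hvm, hfinal, hcond, hodd, hlast, join_empty_cons, String.append_assoc]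
      · have ho : rest.length % 2 ≠ 1 := by simpa using hodd
        have hcond : ¬((rest.length + 1 + 1) % 2 = 1) := by omega
        simp [hpair, hvm, hfinal, hcond, hodd, join_empty_cons, String.append_assoc]

-- ===== VERDICT (by name: the statement is the Claim_ definition above) =====
theorem format_operation_parts_named_py_spec : Claim_equal_format_operation_parts_named_py := by
  intro parts _
  unfold Spec_format_operation_parts_named_py format_operation_parts_named_py format_operation_parts_named_py_alt
  have h0 : ((PySem.Dict.empty : PySem.Dict String String).size : Int) = 0 := by
    rw [PySem.Dict.size_empty]; rfl
  have h := fmtNamedLoop_eq parts "" PySem.Dict.empty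
  rw [h0] at h
  rw [h]
  simp only [String.empty_append]
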